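-- pv_equiv track=rewrite | github.com/jose-a-sa/interview-problems | Python/binary-flip-count.py | count_flips
-- ===== SOURCE A (Python) =====
-- def count_flips(lst):
--     _lst = lst
--     n = len(_lst)
--     c = 0
--     i = 0
--     while i < n-1:
--         if (_lst[i], _lst[i+1]) == (1, 0):
--             _lst[i], _lst[i+1] = 0, 1
--             c += 1
--             i = i-1 if i > 0 else 0
--         else:
--             i += 1
--     return c
-- ===== SOURCE B (Python) =====
-- def count_flips(lst):
--     ones = 0
--     c = 0
--     for x in lst:
--         if x == 1:
--             ones += 1
--         elif x == 0:
--             c += ones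
--         else:
--             ones = 0
--     return c
-- ===== Notes on version B (the rewrite author's own statement) =====
-- stated objective: faster
-- what changed: Replaced A's backtracking adjacent-swap bubble loop with a single left-to-right pass that adds, for each 0, the number of 1s seen since the last non-{0,1} element.
import Mathlib
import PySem

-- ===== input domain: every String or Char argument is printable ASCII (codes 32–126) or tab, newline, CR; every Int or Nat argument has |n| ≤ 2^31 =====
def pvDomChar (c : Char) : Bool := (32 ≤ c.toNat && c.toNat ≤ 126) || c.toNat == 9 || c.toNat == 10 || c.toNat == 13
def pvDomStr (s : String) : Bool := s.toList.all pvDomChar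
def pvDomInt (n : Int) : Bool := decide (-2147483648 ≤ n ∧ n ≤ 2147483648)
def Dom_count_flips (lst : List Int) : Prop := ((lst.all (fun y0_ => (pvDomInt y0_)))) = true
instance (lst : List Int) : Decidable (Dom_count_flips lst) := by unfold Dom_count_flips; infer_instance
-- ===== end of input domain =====

-- B replaces A's backtracking adjacent-swap loop with one left-to-right pass adding, for each 0,
-- the number of 1s seen since the last non-{0,1} element; equivalence is about the RETURN value
-- only (A sorts the binary runs of its argument list in place, B does not mutate it).

-- ===== PORT A =====
-- B's fold step, defined first because A's port cites it as its termination measure: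
-- state = (ones seen in the current {0,1}-run, flips counted so far)
def invStep (s : Nat × Nat) (x : Int) : Nat × Nat :=
  if x = 1 then (s.1 + 1, s.2)
  else if x = 0 then (s.1, s.2 + s.1)
  else (0, s.2)

def invN (l : List Int) : Nat := (l.foldl invStep (0, 0)).2

-- the count component of the fold is affine in the starting count
theorem invStep_snd_add (l : List Int) (o c : Nat) :
    (l.foldl invStep (o, c)).2 = c + (l.foldl invStep (o, 0)).2 := by
  induction l generalizing o c with
  | nil => simp
  | cons x t ih =>
    by_cases h1 : x = 1
    · simp only [List.foldl_cons, invStep, if_pos h1]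
      exact ih (o + 1) c
    · by_cases h0 : x = 0
      · simp only [List.foldl_cons, invStep, if_neg h1, if_pos h0]
        rw [ih o (c + o), ih o (0 + o)]
        omega
      · simp only [List.foldl_cons, invStep, if_neg h1, if_neg h0]
        exact ih 0 c

-- swapping an adjacent (1,0) pair decreases the fold's count by exactly one
-- (cited by loopA's decreasing_by, so it lives above the port)
theorem swap_fold (t : List Int) (i : Nat) (o c : Nat) (h : i + 1 < t.length)
    (h1 : t.getD i 0 = 1) (h0 : t.getD (i + 1) 0 = 0) :
    (((t.set i 0).set (i + 1) 1).foldl invStep (o, c)).2 + 1 = (t.foldl invStep (o, c)).2 := by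
  induction t generalizing i o c with
  | nil => simp at h
  | cons x r ih =>
    cases i with
    | zero =>
      rcases r with _ | ⟨y, r'⟩
      · simp at h
      · have hx : x = 1 := by simpa [List.getD] using h1
        have hy : y = 0 := by simpa [List.getD] using h0
        subst hx; subst hy
        have hset : (((1 : Int) :: 0 :: r').set 0 0).set 1 1 = 0 :: 1 :: r' := rfl
        rw [hset]
        simp only [List.foldl_cons]
        have e1 : invStep (o, c) 0 = (o, c + o) := by norm_num [invStep]
        have e2 : invStep (o, c + o) 1 = (o + 1, c + o) := by simp [invStep]
        have e3 : invStep (o, c) 1 = (o + 1, c) := by simp [invStep]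
        have e4 : invStep (o + 1, c) 0 = (o + 1, c + (o + 1)) := by norm_num [invStep]
        rw [e1, e2, e3, e4, invStep_snd_add r' (o + 1) (c + o),
            invStep_snd_add r' (o + 1) (c + (o + 1))]
        omega
    | succ i' =>
      have hset : ((x :: r).set (i' + 1) 0).set (i' + 1 + 1) 1
          = x :: ((r.set i' 0).set (i' + 1) 1) := rfl
      rw [hset]
      simp only [List.foldl_cons]
      rcases hst : invStep (o, c) x with ⟨o', c'⟩
      exact ih i' o' c' (by simpa using h) (by simpa [List.getD] using h1)
        (by simpa [List.getD] using h0)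

theorem set_set_swap (l : List Int) (i : Nat) (h : i + 1 < l.length)
    (h1 : l.getD i 0 = 1) (h0 : l.getD (i + 1) 0 = 0) :
    invN ((l.set i 0).set (i + 1) 1) + 1 = invN l := by
  unfold invN
  exact swap_fold l i 0 0 h h1 h0

-- literal transliteration of A's while loop; Python's i stays ≥ 0, so a Nat index is exact
-- ('i-1 if i > 0 else 0' is Nat subtraction), and 'i < n-1' with n = len(lst) is 'i+1 < length'
def loopA (l : List Int) (i : Nat) (c : Int) : Int :=
  if h : i + 1 < l.length then
    if hs : l.getD i 0 = 1 ∧ l.getD (i + 1) 0 = 0 then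
      loopA ((l.set i 0).set (i + 1) 1) (i - 1) (c + 1)
    else
      loopA l (i + 1) c
  else c
termination_by invN l * (l.length + 1) + (l.length - i)
decreasing_by
  · have hlen : ((l.set i 0).set (i + 1) 1).length = l.length := by simp
    have hsw := set_set_swap l i h hs.1 hs.2
    rw [hlen, ← hsw]
    nlinarith [Nat.sub_le l.length (i - 1), Nat.sub_le l.length i]
  · omega

def count_flips (lst : List Int) : Int := loopA lst 0 0

-- ===== PORT B =====
def count_flips_alt (lst : List Int) : Int :=
  ((lst.foldl invStep (0, 0)).2 : Int)

-- ===== PRECONDITION & SPEC =====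
def Spec_count_flips (lst : List Int) (out : Int) : Prop := out = count_flips_alt lst
instance (lst : List Int) (out : Int) : Decidable (Spec_count_flips lst out) := by unfold Spec_count_flips; infer_instance

-- ===== CLAIM (what is proved, stated in full; the proofs are below) =====
def Claim_equal_count_flips : Prop := ∀ (lst : List Int), Dom_count_flips lst → Spec_count_flips lst (count_flips lst)

-- ===== LEMMAS AND PROOFS =====

-- a list with no adjacent (1,0) pair folds to count c, provided 'ones' is only nonzero
-- when the first element is not 0 (default 1 so the claim is vacuous on [])
theorem invN_noadj (l : List Int) (o c : Nat)
    (hadj : ∀ j, j + 1 < l.length → ¬(l.getD j 0 = 1 ∧ l.getD (j + 1) 0 = 0))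
    (ho : 0 < o → l.getD 0 1 ≠ 0) :
    (l.foldl invStep (o, c)).2 = c := by
  induction l generalizing o c with
  | nil => simp
  | cons x t ih =>
    have hadj' : ∀ j, j + 1 < t.length → ¬(t.getD j 0 = 1 ∧ t.getD (j + 1) 0 = 0) := by
      intro j hj
      have := hadj (j + 1) (by simp; omega)
      simpa [List.getD] using this
    by_cases h1 : x = 1
    · simp only [List.foldl_cons, invStep, if_pos h1]
      apply ih _ _ hadj'
      intro _
      rcases t with _ | ⟨y, t'⟩
      · simp [List.getD]
      · intro hy0
        exact hadj 0 (by simp)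
          ⟨by simp [List.getD, h1], by simpa [List.getD] using hy0⟩
    · by_cases h0 : x = 0
      · simp only [List.foldl_cons, invStep, if_neg h1, if_pos h0]
        have ho0 : o = 0 := by
          by_contra hno
          exact ho (Nat.pos_of_ne_zero hno) (by simp [List.getD, h0])
        subst ho0
        simp only [Nat.add_zero]
        apply ih _ _ hadj'
        intro hlt
        exact absurd hlt (by omega)
      · simp only [List.foldl_cons, invStep, if_neg h1, if_neg h0]
        apply ih _ _ hadj'
        intro hlt
        exact absurd hlt (by omega)

-- loop invariant: every adjacent pair strictly left of the cursor is not (1,0)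
def Clean (l : List Int) (i : Nat) : Prop :=
  ∀ j, j < i → j + 1 < l.length → ¬(l.getD j 0 = 1 ∧ l.getD (j + 1) 0 = 0)

theorem getD_set_ne (l : List Int) (i j : Nat) (v : Int) (h : i ≠ j) :
    (l.set i v).getD j 0 = l.getD j 0 := by
  simp [List.getD, List.getElem?_set_ne h]

theorem loopA_eq (l : List Int) (i : Nat) (c : Int) (hc : Clean l i) :
    loopA l i c = c + (invN l : Int) := by
  induction l, i, c using loopA.induct with
  | case1 l i c h hs ih =>
    rw [loopA, dif_pos h, dif_pos hs]
    have hcl : Clean ((l.set i 0).set (i + 1) 1) (i - 1) := by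
      intro j hj hjl
      have e1 : ((l.set i 0).set (i + 1) 1).getD j 0 = l.getD j 0 := by
        rw [getD_set_ne _ _ _ _ (by omega), getD_set_ne _ _ _ _ (by omega)]
      have e2 : ((l.set i 0).set (i + 1) 1).getD (j + 1) 0 = l.getD (j + 1) 0 := by
        rw [getD_set_ne _ _ _ _ (by omega), getD_set_ne _ _ _ _ (by omega)]
      rw [e1, e2]
      exact hc j (by omega) (by simpa using hjl)
    rw [ih hcl]
    have hsw := set_set_swap l i h hs.1 hs.2
    omega
  | case2 l i c h hs ih =>
    rw [loopA, dif_pos h, dif_neg hs]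
    apply ih
    intro j hj hjl
    rcases Nat.lt_or_ge j i with hji | hji
    · exact hc j hji hjl
    · have hje : j = i := by omega
      subst hje
      exact hs
  | case3 l i c h =>
    rw [loopA, dif_neg h]
    have h0 : invN l = 0 :=
      invN_noadj l 0 0 (fun j hj => hc j (by omega) hj)
        (fun hlt => absurd hlt (by omega))
    rw [h0]
    simp

-- ===== VERDICT (by name: the statement is the Claim_ definition above) =====
theorem count_flips_spec : Claim_equal_count_flips := by
  intro lst _
  unfold Spec_count_flips count_flips count_flips_alt
  rw [loopA_eq lst 0 0 (by intro j hj hj2; omega)]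
  simp [invN]
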